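-- pv_equiv track=rewrite | github.com/need-singularity/sylvian-singularity | verify/verify_gz_extreme_hypotheses_wave13.py | count_egyptian_pairs
-- ===== SOURCE A (Python) =====
-- def count_egyptian_pairs(target):
--     sols = []
--     for a in range(target+1, target*target+target+2):
--         denom = a - target
--         if denom > 0 and target * a % denom == 0:
--             b = target * a // denom
--             if b >= a:
--                 sols.append((a, b))
--     return len(sols)
-- ===== SOURCE B (Python) =====
-- def count_egyptian_pairs(target):
--     # 1/a + 1/b = 1/target with a <= b  <=>  d = a - target divides target^2 and d <= |target|
--     n = abs(target)
--     return sum(1 for d in range(1, n + 1) if (n * n) % d == 0)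
-- ===== Notes on version B (the rewrite author's own statement) =====
-- stated objective: faster
-- what changed: Instead of scanning every candidate a in (target, target^2+target+1] and testing divisibility of target*a, B counts the divisors d of target^2 with 1 <= d <= |target| in a single short pass (d = a - target is such a divisor exactly when (a,b) is a solution with b >= a).
import Mathlib
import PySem

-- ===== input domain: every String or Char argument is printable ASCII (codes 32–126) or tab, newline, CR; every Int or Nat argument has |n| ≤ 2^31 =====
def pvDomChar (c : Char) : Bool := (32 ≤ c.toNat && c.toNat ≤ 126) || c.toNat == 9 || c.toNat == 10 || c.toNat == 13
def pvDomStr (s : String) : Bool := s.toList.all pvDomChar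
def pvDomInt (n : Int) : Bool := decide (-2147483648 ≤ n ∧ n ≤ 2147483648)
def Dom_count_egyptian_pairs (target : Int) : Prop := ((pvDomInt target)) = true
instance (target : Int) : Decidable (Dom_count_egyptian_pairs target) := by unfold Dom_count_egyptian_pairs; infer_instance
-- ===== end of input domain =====

-- B replaces A's scan over all candidates a in (target, target^2+target+1] by a single pass
-- counting the divisors d of target^2 with 1 <= d <= |target| (d = a - target); same result.


-- ===== PORT A =====
def count_egyptian_pairs (target : Int) : Int :=
  let sols : List (Int × Int) :=
    (PySem.List.pyRange (target + 1) (target * target + target + 2) 1).foldl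
      (fun sols a =>
        let denom := a - target
        if 0 < denom ∧ PySem.Int.mod (target * a) denom = 0 then
          let b := PySem.Int.floordiv (target * a) denom
          if b ≥ a then sols ++ [(a, b)] else sols
        else sols)
      []
  (sols.length : Int)

-- ===== PORT B =====
def count_egyptian_pairs_alt (target : Int) : Int :=
  let n : Int := |target|
  (PySem.List.pyRange 1 (n + 1) 1).foldl
    (fun acc d => if PySem.Int.mod (n * n) d = 0 then acc + 1 else acc) 0

-- ===== PRECONDITION & SPEC =====
def Spec_count_egyptian_pairs (target : Int) (out : Int) : Prop := out = count_egyptian_pairs_alt target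
instance (target : Int) (out : Int) : Decidable (Spec_count_egyptian_pairs target out) := by unfold Spec_count_egyptian_pairs; infer_instance

-- ===== CLAIM (what is proved, stated in full; the proofs are below) =====
def Claim_equal_count_egyptian_pairs : Prop := ∀ (target : Int), Dom_count_egyptian_pairs target → Spec_count_egyptian_pairs target (count_egyptian_pairs target)

-- ===== LEMMAS AND PROOFS =====

-- the Boolean test A applies to a candidate a
def pQ (t : Int) (a : Int) : Bool :=
  decide (0 < a - t ∧ PySem.Int.mod (t * a) (a - t) = 0 ∧
    PySem.Int.floordiv (t * a) (a - t) ≥ a)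

-- A's result is the count of candidates passing pQ
theorem pvA_count (t : Int) :
    count_egyptian_pairs t =
      ((PySem.List.pyRange (t + 1) (t * t + t + 2) 1).countP (pQ t) : Int) := by
  unfold count_egyptian_pairs
  rw [PySem.List.foldl_congr_mem _ _
      (fun sols a => if pQ t a then sols ++ [(a, PySem.Int.floordiv (t * a) (a - t))] else sols)
      _ ?_]
  · rw [PySem.List.foldl_append_if]
    simp [List.countP_eq_length_filter]
  · intro acc x _
    simp only [pQ, decide_eq_true_eq, ge_iff_le]
    split_ifs <;> tauto

-- the candidate a = t+1+k passes A's test iff k+1 divides t^2 and k+1 ≤ |t|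
theorem pv_iff (t : Int) (k : Nat) :
    pQ t (t + 1 + (k : Int)) = true ↔
      (((k : Int) + 1) ∣ t * t ∧ ((k : Int) + 1) ≤ |t|) := by
  have hc : (0 : Int) < (k : Int) + 1 := by positivity
  have hd : (t + 1 + (k : Int)) - t = (k : Int) + 1 := by ring
  simp only [pQ, decide_eq_true_eq, hd, ge_iff_le, PySem.Int.mod_eq_zero_iff_dvd,
    PySem.Int.le_floordiv_iff_mul_le hc]
  have habs := abs_mul_abs_self t
  have hA := abs_nonneg t
  have hdvd : (((k : Int) + 1) ∣ t * (t + 1 + (k : Int))) ↔ (((k : Int) + 1) ∣ t * t) := by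
    have he : t * (t + 1 + (k : Int)) = t * t + t * ((k : Int) + 1) := by ring
    rw [he, dvd_add_left (dvd_mul_left _ t)]
  have hle : ((t + 1 + (k : Int)) * ((k : Int) + 1) ≤ t * (t + 1 + (k : Int))) ↔
      (((k : Int) + 1) ≤ |t|) := by
    constructor
    · intro h; nlinarith
    · intro h; nlinarith
  rw [hdvd, hle]
  constructor
  · rintro ⟨-, h2, h3⟩; exact ⟨h2, h3⟩
  · rintro ⟨h2, h3⟩; exact ⟨hc, h2, h3⟩

theorem pv_main (t : Int) : count_egyptian_pairs t = count_egyptian_pairs_alt t := by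
  have hA := abs_nonneg t
  have habs := abs_mul_abs_self t
  have h1 : |t| ≤ t * t + 1 := by nlinarith
  rw [pvA_count]
  unfold count_egyptian_pairs_alt
  rw [PySem.List.foldl_ite_add_one]
  rw [PySem.List.pyRange_one, PySem.List.pyRange_one, List.countP_map, List.countP_map]
  have hM : (t * t + t + 2 - (t + 1)).toNat = |t|.toNat + (t * t + 1 - |t|).toNat := by
    have he : t * t + t + 2 - (t + 1) = t * t + 1 := by ring
    rw [he]; omega
  have hn : (|t| + 1 - 1).toNat = |t|.toNat := by omega
  rw [hM, hn, List.range_add, List.countP_append]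
  have htail : List.countP ((pQ t) ∘ fun k : Nat => t + 1 + (k : Int))
      (List.map (fun x => |t|.toNat + x) (List.range (t * t + 1 - |t|).toNat)) = 0 := by
    rw [List.countP_eq_zero]
    intro a ha
    simp only [List.mem_map] at ha
    obtain ⟨j, -, rfl⟩ := ha
    simp only [Function.comp_apply, pv_iff]
    rintro ⟨-, h2⟩
    have : ((|t|.toNat + j : Nat) : Int) = |t| + (j : Int) := by push_cast; omega
    omega
  have hhead : List.countP ((pQ t) ∘ fun k : Nat => t + 1 + (k : Int)) (List.range |t|.toNat)
      = List.countP ((fun d => decide (PySem.Int.mod (|t| * |t|) d = 0)) ∘ fun k : Nat => 1 + (k : Int))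
        (List.range |t|.toNat) := by
    apply List.countP_congr
    intro k hk
    simp only [List.mem_range] at hk
    have hkn : (k : Int) + 1 ≤ |t| := by omega
    have hc1 : (1 : Int) + (k : Int) = (k : Int) + 1 := by ring
    simp only [Function.comp_apply, pv_iff, decide_eq_true_eq,
      PySem.Int.mod_eq_zero_iff_dvd, habs, hc1]
    constructor
    · rintro ⟨h2, -⟩; exact h2
    · intro h2; exact ⟨h2, hkn⟩
  rw [htail, hhead]
  omega

-- ===== VERDICT (by name: the statement is the Claim_ definition above) =====
theorem count_egyptian_pairs_spec : Claim_equal_count_egyptian_pairs := by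
  intro t _
  exact pv_main t
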